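-- pv_equiv track=rewrite | github.com/colabyh/fastapi-docker-heroku | app/guess_xor_length.py | count_equals
-- ===== SOURCE A (Python) =====
-- def count_equals(text, key_length):
--     """Count equal chars count for each offset and sum them"""
--     equals_count = 0
--     if key_length >= len(text):
--         return 0
--
--     for offset in range(key_length):
--         chars_count = chars_count_at_offset(text, key_length, offset)
--         equals_count += max(chars_count.values()) - 1  # why -1? don't know
--     return equals_count
--
-- def chars_count_at_offset(text, key_length, offset):
--     chars_count = dict()
--     for pos in range(offset, len(text), key_length):
--         c = text[pos]
--         if c in chars_count:
--             chars_count[c] += 1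
--         else:
--             chars_count[c] = 1
--     return chars_count
-- ===== SOURCE B (Python) =====
-- def count_equals(text, key_length):
--     """Count equal chars count for each offset and sum them"""
--     if key_length >= len(text) or key_length <= 0:
--         return 0
--     buckets = [dict() for _ in range(key_length)]
--     for pos in range(len(text)):
--         b = buckets[pos % key_length]
--         c = text[pos]
--         b[c] = b.get(c, 0) + 1
--     return sum(max(b.values()) - 1 for b in buckets)
-- ===== Notes on version B (the rewrite author's own statement) =====
-- stated objective: alternative
-- what changed: Replaces the per-offset helper that rescans the text with a stride for each offset (and its membership-test dict update) with a single forward pass that buckets every position into per-offset frequency dicts via pos % key_length, then sums max-1 over the buckets.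
import Mathlib
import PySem

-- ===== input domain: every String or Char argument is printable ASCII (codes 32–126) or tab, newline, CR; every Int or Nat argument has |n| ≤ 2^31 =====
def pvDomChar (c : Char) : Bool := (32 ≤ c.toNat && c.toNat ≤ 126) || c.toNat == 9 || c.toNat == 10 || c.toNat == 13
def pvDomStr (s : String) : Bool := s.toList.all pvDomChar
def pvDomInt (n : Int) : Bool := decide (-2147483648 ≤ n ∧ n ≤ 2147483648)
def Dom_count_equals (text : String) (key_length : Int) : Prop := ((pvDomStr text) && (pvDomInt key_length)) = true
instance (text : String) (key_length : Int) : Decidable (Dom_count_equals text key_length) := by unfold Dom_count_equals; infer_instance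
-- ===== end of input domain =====

-- B replaces A's per-offset strided rescans of the text with one forward pass that buckets
-- every position into per-offset frequency dicts via pos % key_length (objective: alternative).

-- ===== PORT A =====
def chars_count_at_offset (text : String) (key_length : Int) (offset : Int) : PySem.Dict Char Int :=
  (PySem.List.pyRange offset (PySem.Str.len text) key_length).foldl
    (fun chars_count pos =>
      -- text[pos]: every position this range produces is in bounds, so the ' ' default is unreachable
      let c := (PySem.Str.pyGet? text pos).getD ' '
      if chars_count.contains c then chars_count.insert c (chars_count.getD c 0 + 1)
      else chars_count.insert c 1)
    PySem.Dict.empty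

def count_equals (text : String) (key_length : Int) : Int :=
  if key_length ≥ PySem.Str.len text then 0
  else
    (PySem.List.pyRange 0 key_length 1).foldl
      (fun equals_count offset =>
        let chars_count := chars_count_at_offset text key_length offset
        equals_count + (((PySem.List.max? chars_count.values (fun v => v)).getD 0) - 1))
      0

-- ===== PORT B =====
def count_equals_alt (text : String) (key_length : Int) : Int :=
  if key_length ≥ PySem.Str.len text ∨ key_length ≤ 0 then 0
  else
    let init := (PySem.List.pyRange 0 key_length 1).map
      (fun _ => (PySem.Dict.empty : PySem.Dict Char Int))
    let buckets := (PySem.List.pyRange 0 (PySem.Str.len text) 1).foldl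
      (fun bs pos =>
        let i := PySem.Int.mod pos key_length
        let b := PySem.List.pyGetD bs i PySem.Dict.empty
        -- text[pos]: pos ranges over 0 ≤ pos < len(text), so the ' ' default is unreachable
        let c := (PySem.Str.pyGet? text pos).getD ' '
        bs.set i.toNat (b.insert c (b.getD c 0 + 1)))
      init
    (buckets.map (fun b => ((PySem.List.max? b.values (fun v => v)).getD 0) - 1)).sum

-- ===== PRECONDITION & SPEC =====
def Spec_count_equals (text : String) (key_length : Int) (out : Int) : Prop := out = count_equals_alt text key_length
instance (text : String) (key_length : Int) (out : Int) : Decidable (Spec_count_equals text key_length out) := by unfold Spec_count_equals; infer_instance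

-- ===== CLAIM (what is proved, stated in full; the proofs are below) =====
def Claim_equal_count_equals : Prop := ∀ (text : String) (key_length : Int), Dom_count_equals text key_length → Spec_count_equals text key_length (count_equals text key_length)

-- ===== LEMMAS AND PROOFS =====

-- the common dict update 'd[c] = d.get(c, 0) + 1'
def pvUpd (d : PySem.Dict Char Int) (c : Char) : PySem.Dict Char Int :=
  d.insert c (d.getD c 0 + 1)

-- the character at a (in-bounds) position
def pvF (text : String) (j : Nat) : Char := text.toList.getD j ' '

-- the frequency dict of offset o: fold the update over the positions ≡ o (mod kn)
def pvCC (text : String) (kn o : Nat) : PySem.Dict Char Int :=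
  ((List.range text.toList.length).filter (fun j => j % kn == o)).foldl
    (fun d j => pvUpd d (pvF text j)) PySem.Dict.empty

-- the summand both programs contribute for offset o
def pvG (text : String) (kn o : Nat) : Int :=
  ((PySem.List.max? (pvCC text kn o).values (fun v => v)).getD 0) - 1

def pvCast (l : List Nat) : List Int := List.map (fun j => Int.ofNat j) l

-- A's two-branch update equals B's unconditional one
lemma pvUpd_eq (d : PySem.Dict Char Int) (c : Char) :
    (if d.contains c then d.insert c (d.getD c 0 + 1) else d.insert c 1) = pvUpd d c := by
  unfold pvUpd
  by_cases h : d.contains c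
  · simp [h]
  · simp only [Bool.not_eq_true] at h
    simp [h, PySem.Dict.getD_of_not_contains d 0 h]

-- membership in a positive-stride range vs the filtered full range
lemma pv_mem (k : Int) (hk : 0 < k) (o : Nat) (ho : (o : Int) < k) (n : Nat) (x : Int) :
    x ∈ PySem.List.pyRange (o : Int) (n : Int) k ↔
      x ∈ pvCast ((List.range n).filter (fun j => j % k.toNat == o)) := by
  rw [PySem.List.mem_pyRange_iff_of_pos hk]
  simp [pvCast]
  constructor
  · rintro ⟨h1, h2, h3⟩
    refine ⟨x.toNat, ⟨?_, ?_⟩, by omega⟩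
    · omega
    · have hxo : x % k = (o : Int) := by
        have h0 : (x - o) % k = 0 := Int.emod_eq_zero_of_dvd h3
        have := Int.emod_eq_emod_iff_emod_sub_eq_zero.mpr h0
        rwa [Int.emod_eq_of_lt (by omega) ho] at this
      have hcast : ((x.toNat % k.toNat : Nat) : Int) = (o : Int) := by
        push_cast
        rw [Int.toNat_of_nonneg (by omega), Int.toNat_of_nonneg (by omega)]
        exact hxo
      exact_mod_cast hcast
  · rintro ⟨j, ⟨hj, hjo⟩, rfl⟩
    have hmle : o ≤ j := hjo ▸ Nat.mod_le j k.toNat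
    have hkk : ((k.toNat : Nat) : Int) = k := Int.toNat_of_nonneg (by omega)
    have h2' : ((k.toNat : Nat) : Int) * ((j / k.toNat : Nat) : Int) + ((j % k.toNat : Nat) : Int) = (j : Int) := by
      exact_mod_cast Nat.div_add_mod j k.toNat
    rw [hkk, hjo] at h2'
    refine ⟨by exact_mod_cast hmle, by exact_mod_cast hj, ⟨((j / k.toNat : Nat) : Int), by linarith⟩⟩

-- a positive-stride range IS the filtered full range
lemma pv_strided (k : Int) (hk : 0 < k) (o : Nat) (ho : (o : Int) < k) (n : Nat) :
    PySem.List.pyRange (o : Int) (n : Int) k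
      = pvCast ((List.range n).filter (fun j => j % k.toNat == o)) := by
  have hpw1 : (PySem.List.pyRange (o : Int) (n : Int) k).Pairwise (· < ·) := by
    rw [PySem.List.pyRange_of_pos _ _ hk]
    refine List.Pairwise.map _ (fun a b hab => ?_) (List.pairwise_lt_range)
    have h : (a : Int) < b := by exact_mod_cast hab
    nlinarith
  have hpw2 : (pvCast ((List.range n).filter (fun j => j % k.toNat == o))).Pairwise (· < ·) := by
    unfold pvCast
    rw [List.pairwise_map]
    exact (List.Pairwise.filter _ List.pairwise_lt_range).imp (fun h => Int.ofNat_lt.mpr h)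
  have hperm : (pvCast ((List.range n).filter (fun j => j % k.toNat == o))).Perm
      (PySem.List.pyRange (o : Int) (n : Int) k) := by
    rw [List.perm_ext_iff_of_nodup (hpw2.imp ne_of_lt) (hpw1.imp ne_of_lt)]
    exact fun x => (pv_mem k hk o ho n x).symm
  have h1 := PySem.List.sorted_eq_of_perm_of_pairwise_lt
    (PySem.List.pyRange (o : Int) (n : Int) k) _ (fun x => x) hperm (by simpa using hpw2)
  have h2 := PySem.List.sorted_eq_of_perm_of_pairwise_lt
    (PySem.List.pyRange (o : Int) (n : Int) k) _ (fun x => x) (List.Perm.refl _) (by simpa using hpw1)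
  rw [← h1, h2]

-- the bucket fold preserves the list length
lemma pv_buckets_length (f : Nat → Char) (kn : Nat) (L : List Nat)
    (bs : List (PySem.Dict Char Int)) :
    (L.foldl (fun bs j => bs.set (j % kn) (pvUpd (bs.getD (j % kn) PySem.Dict.empty) (f j))) bs).length
      = bs.length := by
  induction L generalizing bs with
  | nil => rfl
  | cons x t ih => rw [List.foldl_cons, ih]; simp

-- bucket o of the single-pass fold is the fold over the positions congruent to o
lemma pv_buckets (f : Nat → Char) (kn : Nat) (n : Nat)
    (bs : List (PySem.Dict Char Int)) (o : Nat) (ho : o < kn) (hk : 0 < kn) (hbs : bs.length = kn) :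
    ((List.range n).foldl (fun bs j => bs.set (j % kn) (pvUpd (bs.getD (j % kn) PySem.Dict.empty) (f j))) bs).getD o PySem.Dict.empty
      = ((List.range n).filter (fun j => j % kn == o)).foldl (fun d j => pvUpd d (f j))
          (bs.getD o PySem.Dict.empty) := by
  induction n with
  | zero => rfl
  | succ m ih =>
    rw [List.range_succ, List.foldl_append, List.filter_append, List.foldl_append, ← ih]
    set BS := (List.range m).foldl (fun bs j => bs.set (j % kn) (pvUpd (bs.getD (j % kn) PySem.Dict.empty) (f j))) bs with hBS
    have hlen : BS.length = kn := by rw [hBS, pv_buckets_length, hbs]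
    have hin : m % kn < BS.length := by rw [hlen]; exact Nat.mod_lt _ hk
    by_cases hmo : m % kn = o
    · simp only [List.foldl_cons, List.foldl_nil, hmo, List.filter_cons]
      simp [List.getD_eq_getElem?_getD, hlen, ho]
    · have hb : (m % kn == o) = false := by simpa using hmo
      simp only [List.foldl_cons, List.foldl_nil, List.filter_cons, hb]
      simp only [List.getD_eq_getElem?_getD, List.getElem?_set]
      simp [hmo]

-- a map over a list is a map over its index range
lemma pv_map_range_getD {α β : Type} (l : List α) (d : α) (h : α → β) :
    l.map h = (List.range l.length).map (fun i => h (l.getD i d)) := by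
  apply List.ext_getElem
  · simp
  · intro i h1 h2
    simp [List.getD_eq_getElem?_getD, List.getElem?_eq_getElem (by simpa using h2)]

-- A's side: the per-offset strided dict is pvCC
lemma pv_A_offset (text : String) (k : Int) (hk : 0 < k) (o : Nat) (ho : (o : Int) < k) :
    chars_count_at_offset text k (o : Int) = pvCC text k.toNat o := by
  unfold chars_count_at_offset pvCC
  rw [PySem.Str.len_eq, pv_strided k hk o ho text.toList.length]
  unfold pvCast
  rw [List.foldl_map]
  refine PySem.List.foldl_congr_mem _ _ _ _ (fun d j _ => ?_)
  have hc : (PySem.Str.pyGet? text (Int.ofNat j)).getD ' ' = pvF text j := by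
    rw [show (Int.ofNat j) = ((j : Nat) : Int) from rfl, PySem.Str.pyGet?_natCast]
    rw [pvF, List.getD_eq_getElem?_getD]
  simp only [hc]
  exact pvUpd_eq d (pvF text j)

-- A's side: the whole loop as a sum over offsets
lemma pv_A_eq (text : String) (k : Int) (hk : 0 < k) (hlt : k < (text.toList.length : Int)) :
    count_equals text k = ((List.range k.toNat).map (fun o => pvG text k.toNat o)).sum := by
  unfold count_equals
  rw [if_neg (by rw [PySem.Str.len_eq]; omega)]
  have hkn : k = ((k.toNat : Nat) : Int) := (Int.toNat_of_nonneg (le_of_lt hk)).symm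
  have hpr : PySem.List.pyRange 0 k 1 = pvCast (List.range k.toNat) := by
    conv_lhs => rw [hkn]
    rw [PySem.List.pyRange_zero_nat k.toNat]
    rfl
  rw [hpr]
  unfold pvCast
  rw [List.foldl_map]
  have key : (List.range k.toNat).foldl (fun (x : Int) (o : Nat) =>
      x + (((PySem.List.max? (chars_count_at_offset text k (Int.ofNat o)).values (fun v => v)).getD 0) - 1)) 0
      = (List.range k.toNat).foldl (fun (x : Int) (o : Nat) => x + pvG text k.toNat o) 0 := by
    refine PySem.List.foldl_congr_mem _ _ _ _ (fun acc o hmem => ?_)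
    rw [List.mem_range] at hmem
    have ho : (o : Int) < k := by omega
    rw [show (Int.ofNat o) = ((o : Nat) : Int) from rfl, pv_A_offset text k hk o ho]
    rfl
  exact key.trans (by rw [PySem.List.foldl_add (g := fun (o : Nat) => pvG text k.toNat o), zero_add])

-- B's side: the single-pass bucket program as the same sum over offsets
lemma pv_B_eq (text : String) (k : Int) (hk : 0 < k) (hlt : k < (text.toList.length : Int)) :
    count_equals_alt text k = ((List.range k.toNat).map (fun o => pvG text k.toNat o)).sum := by
  unfold count_equals_alt
  rw [if_neg (by rw [PySem.Str.len_eq]; omega)]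
  have hkn : k = ((k.toNat : Nat) : Int) := (Int.toNat_of_nonneg (le_of_lt hk)).symm
  have hk0 : 0 < k.toNat := by omega
  set n := text.toList.length with hn
  have hinit : (PySem.List.pyRange 0 k 1).map (fun _ => (PySem.Dict.empty : PySem.Dict Char Int))
      = List.replicate k.toNat PySem.Dict.empty := by
    conv_lhs => rw [hkn, PySem.List.pyRange_zero_nat k.toNat]
    rw [List.map_map]
    simp only [Function.comp_def]
    rw [List.map_const', List.length_range]
  have hfold : (PySem.List.pyRange 0 (PySem.Str.len text) 1).foldl
        (fun bs pos =>
          let i := PySem.Int.mod pos k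
          let b := PySem.List.pyGetD bs i PySem.Dict.empty
          let c := (PySem.Str.pyGet? text pos).getD ' '
          bs.set i.toNat (b.insert c (b.getD c 0 + 1)))
        (List.replicate k.toNat PySem.Dict.empty)
      = (List.range n).foldl
          (fun bs j => bs.set (j % k.toNat) (pvUpd (bs.getD (j % k.toNat) PySem.Dict.empty) (pvF text j)))
          (List.replicate k.toNat PySem.Dict.empty) := by
    rw [PySem.Str.len_eq, ← hn]
    have hpr : PySem.List.pyRange 0 (n : Int) 1 = pvCast (List.range n) := by
      rw [PySem.List.pyRange_zero_nat n]
      rfl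
    rw [hpr]
    unfold pvCast
    rw [List.foldl_map]
    refine PySem.List.foldl_congr_mem _ _ _ _ (fun bs j _ => ?_)
    have hmod : PySem.Int.mod (Int.ofNat j) k = Int.ofNat (j % k.toNat) := by
      conv_lhs => rw [hkn]
      exact PySem.Int.mod_natCast j k.toNat
    have hc : (PySem.Str.pyGet? text (Int.ofNat j)).getD ' ' = pvF text j := by
      rw [show (Int.ofNat j) = ((j : Nat) : Int) from rfl, PySem.Str.pyGet?_natCast]
      rw [pvF, List.getD_eq_getElem?_getD]
    show bs.set (PySem.Int.mod (Int.ofNat j) k).toNat _ = _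
    rw [hmod, hc]
    rw [show (Int.ofNat (j % k.toNat)).toNat = j % k.toNat from rfl]
    rw [show PySem.List.pyGetD bs (Int.ofNat (j % k.toNat)) PySem.Dict.empty
          = bs.getD (j % k.toNat) PySem.Dict.empty from PySem.List.pyGetD_natCast bs (j % k.toNat) PySem.Dict.empty]
    rfl
  simp only [hinit, hfold]
  rw [pv_map_range_getD _ PySem.Dict.empty]
  rw [pv_buckets_length, List.length_replicate]
  refine congrArg List.sum (List.map_congr_left (fun o hmem => ?_))
  rw [List.mem_range] at hmem
  rw [pv_buckets (pvF text) k.toNat n _ o hmem hk0 (List.length_replicate)]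
  have hrep : (List.replicate k.toNat (PySem.Dict.empty : PySem.Dict Char Int)).getD o PySem.Dict.empty
      = PySem.Dict.empty := by
    rw [List.getD_eq_getElem?_getD, List.getElem?_replicate, if_pos hmem]
    rfl
  rw [hrep]
  rfl

-- ===== VERDICT (by name: the statement is the Claim_ definition above) =====
theorem count_equals_spec : Claim_equal_count_equals := by
  intro text key_length _
  unfold Spec_count_equals
  by_cases hge : key_length ≥ PySem.Str.len text
  · unfold count_equals count_equals_alt
    rw [if_pos hge, if_pos (Or.inl hge)]
  · by_cases hk0 : key_length ≤ 0
    · unfold count_equals count_equals_alt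
      rw [if_neg hge, if_pos (Or.inr hk0), PySem.List.pyRange_one_eq_nil hk0]
      rfl
    · have hk : 0 < key_length := by omega
      have hlt : key_length < (text.toList.length : Int) := by
        rw [PySem.Str.len_eq] at hge
        omega
      rw [pv_A_eq text key_length hk hlt, pv_B_eq text key_length hk hlt]
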